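-- pv_equiv track=rewrite | github.com/ppercent/Picture-Sorter | src/utils/utils.py | is_naming_valid
-- ===== SOURCE A (Python) =====
-- def is_naming_valid(naming_type):
--     valid_separators = ['-', '_', ' ']
--     valid_chars = ['y', 'm', 'd', 'H', 'M', 'S']
--
--     i = 0
--     while i < len(naming_type):
--         char = naming_type[i]
--         if char in valid_separators:
--             # is valid separator, skip to next char
--             i += 1
--             continue
--         if char not in valid_chars and char not in valid_separators:
--             # unsupported char, invalid
--             return False
--         if char == 'y':
--            if len(naming_type) - i < 4:
--                # not enought place to fit 4 Ys, invalid
--                return False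
--            else:
--                for j in range(1, 4):
--                    if naming_type[i+j] != 'y':
--                        # wrong Ys sequence, invalid
--                        return False
--                i += 4
--                continue
--         else:
--             if len(naming_type) - i < 2:
--                 # not enought place to fit 2 correct letters, invalid
--                 return False
--             else:
--                 if naming_type[i] != naming_type[i+1]:
--                     # wrong sequence, invalid
--                     return False
--                 i += 2
--                 continue
--         i += 1
--     # is valid
--     return True
-- ===== SOURCE B (Python) =====
-- # Token-table scanner: at each position greedily consume the first matching
-- # token from a fixed tuple (separators and whole date tokens) instead of
-- # A's per-character branch logic with inner index checks.
-- _TOKENS = ('-', '_', ' ', 'yyyy', 'mm', 'dd', 'HH', 'MM', 'SS')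
--
-- def is_naming_valid(naming_type):
--     pos = 0
--     n = len(naming_type)
--     while pos < n:
--         for t in _TOKENS:
--             if naming_type.startswith(t, pos):
--                 pos += len(t)
--                 break
--         else:
--             return False
--     return True
-- ===== Notes on version B (the rewrite author's own statement) =====
-- stated objective: idiomatic
-- what changed: Replaces A's per-character while-loop with hand-coded branch logic and index bound checks by a data-driven scan that repeatedly consumes the first matching token from a fixed table ('-', '_', ' ', 'yyyy', 'mm', 'dd', 'HH', 'MM', 'SS') using str.startswith.
import Mathlib
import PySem

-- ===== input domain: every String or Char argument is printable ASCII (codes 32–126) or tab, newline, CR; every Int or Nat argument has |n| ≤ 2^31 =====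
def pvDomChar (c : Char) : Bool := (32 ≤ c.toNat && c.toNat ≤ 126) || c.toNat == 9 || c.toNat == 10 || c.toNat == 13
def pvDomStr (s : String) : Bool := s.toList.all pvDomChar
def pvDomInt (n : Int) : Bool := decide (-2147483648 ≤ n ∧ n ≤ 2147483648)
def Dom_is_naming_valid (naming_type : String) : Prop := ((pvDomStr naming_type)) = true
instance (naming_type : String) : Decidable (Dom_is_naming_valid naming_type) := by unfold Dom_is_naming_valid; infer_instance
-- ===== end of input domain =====

-- B replaces A's per-character branch logic by a data-driven scan over a fixed token table (idiomatic, same cost).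

-- ===== PORT A =====
-- While-loop over index i (the inner `for j in range(1, 4)` is its three checks in order).
def pvALoop (l : List Char) (i : Nat) : Bool :=
  if h : i < l.length then
    let char := l[i]
    if char = '-' ∨ char = '_' ∨ char = ' ' then pvALoop l (i+1)
    else if ¬ (char = 'y' ∨ char = 'm' ∨ char = 'd' ∨ char = 'H' ∨ char = 'M' ∨ char = 'S') then
      false
    else if char = 'y' then
      if h4 : l.length - i < 4 then false
      else if l[i+1]'(by omega) ≠ 'y' then false
      else if l[i+2]'(by omega) ≠ 'y' then false
      else if l[i+3]'(by omega) ≠ 'y' then false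
      else pvALoop l (i+4)
    else
      if h2 : l.length - i < 2 then false
      else if l[i]'(by omega) ≠ l[i+1]'(by omega) then false
      else pvALoop l (i+2)
  else true
termination_by l.length - i

def is_naming_valid (naming_type : String) : Bool :=
  pvALoop naming_type.toList 0

-- ===== PORT B =====
-- `s.startswith(t, pos)` (exact for ASCII): t is a prefix of the characters from pos on.
def pvStartsWith : List Char → List Char → Bool
  | [], _ => true
  | _ :: _, [] => false
  | t :: ts, c :: cs => if t = c then pvStartsWith ts cs else false

def pvTokens : List (List Char) :=
  [['-'], ['_'], [' '], ['y','y','y','y'], ['m','m'], ['d','d'], ['H','H'], ['M','M'], ['S','S']]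

-- the `for t in _TOKENS: … break / else: return False` search: first matching token
def pvFind (cur : List Char) : List (List Char) → Option (List Char)
  | [] => none
  | t :: ts => if pvStartsWith t cur then some t else pvFind cur ts

-- termination helper for pvBLoop (the found token comes from the table, so it is nonempty)
theorem pvFind_mem : ∀ (ts : List (List Char)) (cur t : List Char), pvFind cur ts = some t → t ∈ ts := by
  intro ts
  induction ts with
  | nil => intro cur t h; simp [pvFind] at h
  | cons x xs ih =>
    intro cur t h
    simp only [pvFind] at h
    split at h
    · simp at h; simp [h]
    · exact List.mem_cons_of_mem _ (ih cur t h)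

def pvBLoop (l : List Char) (pos : Nat) : Bool :=
  if h : pos < l.length then
    match hf : pvFind (l.drop pos) pvTokens with
    | some t => pvBLoop l (pos + t.length)
    | none => false
  else true
termination_by l.length - pos
decreasing_by
  have hm := pvFind_mem _ _ _ hf
  have ht : 1 ≤ t.length := by
    simp only [pvTokens, List.mem_cons, List.mem_singleton, List.not_mem_nil, or_false] at hm
    rcases hm with rfl | rfl | rfl | rfl | rfl | rfl | rfl | rfl | rfl <;> simp
  omega

def is_naming_valid_alt (naming_type : String) : Bool :=
  pvBLoop naming_type.toList 0

-- ===== PRECONDITION & SPEC =====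
def Spec_is_naming_valid (naming_type : String) (out : Bool) : Prop := out = is_naming_valid_alt naming_type
instance (naming_type : String) (out : Bool) : Decidable (Spec_is_naming_valid naming_type out) := by unfold Spec_is_naming_valid; infer_instance

-- ===== CLAIM (what is proved, stated in full; the proofs are below) =====
def Claim_equal_is_naming_valid : Prop := ∀ (naming_type : String), Dom_is_naming_valid naming_type → Spec_is_naming_valid naming_type (is_naming_valid naming_type)

-- ===== LEMMAS AND PROOFS =====

theorem pvStartsWith_length_le : ∀ (t s : List Char), pvStartsWith t s = true → t.length ≤ s.length := by
  intro t
  induction t with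
  | nil => intro s _; simp
  | cons a as ih =>
    intro s h
    cases s with
    | nil => simp [pvStartsWith] at h
    | cons c cs =>
      simp only [pvStartsWith] at h
      split at h
      · simpa using Nat.succ_le_succ (ih cs h)
      · exact absurd h (by simp)

theorem pvBLoop_eq (l : List Char) (pos : Nat) :
    pvBLoop l pos =
      if pos < l.length then
        (match pvFind (l.drop pos) pvTokens with
         | some t => pvBLoop l (pos + t.length)
         | none => false)
      else true := by
  rw [pvBLoop]
  split_ifs with h
  · cases hf : pvFind (l.drop pos) pvTokens <;> simp [hf]
  · rfl

theorem pv_main : ∀ (l : List Char) (i : Nat), pvALoop l i = pvBLoop l i := by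
  intro l i
  fun_induction pvALoop l i with
  | case1 i hlt char hsep ih =>
    have hchar : char = l[i]'hlt := rfl
    rw [pvBLoop_eq, if_pos hlt, List.drop_eq_getElem_cons hlt, ← hchar]
    rcases hsep with hc | hc | hc <;> rw [hc] <;>
      simpa [-List.getElem_cons_drop, pvFind, pvTokens, pvStartsWith] using ih
  | case2 i hlt char hsep hval =>
    have hchar : char = l[i]'hlt := rfl
    rw [pvBLoop_eq, if_pos hlt, List.drop_eq_getElem_cons hlt, ← hchar]
    push_neg at hsep hval
    obtain ⟨h1, h2, h3⟩ := hsep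
    obtain ⟨h4, h5, h6, h7, h8, h9⟩ := hval
    simp [-List.getElem_cons_drop, pvFind, pvTokens, pvStartsWith, Ne.symm h1, Ne.symm h2, Ne.symm h3,
      Ne.symm h4, Ne.symm h5, Ne.symm h6, Ne.symm h7, Ne.symm h8, Ne.symm h9]
  | case3 i hlt char hsep hval hy h4 =>
    have hchar : char = l[i]'hlt := rfl
    rw [pvBLoop_eq, if_pos hlt, List.drop_eq_getElem_cons hlt, ← hchar, hy]
    have hshort : pvStartsWith ['y','y','y'] (l.drop (i+1)) = false := by
      cases heq : pvStartsWith ['y','y','y'] (l.drop (i+1)) with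
      | false => rfl
      | true =>
        have := pvStartsWith_length_le _ _ heq
        simp [List.length_drop] at this
        omega
    simp [-List.getElem_cons_drop, pvFind, pvTokens, pvStartsWith, hshort]
  | case4 i hlt char hsep hval hy h4 hm1 =>
    have hchar : char = l[i]'hlt := rfl
    have h1 : i + 1 < l.length := by omega
    rw [pvBLoop_eq, if_pos hlt, List.drop_eq_getElem_cons hlt, ← hchar, hy,
      List.drop_eq_getElem_cons h1]
    simp [-List.getElem_cons_drop, pvFind, pvTokens, pvStartsWith, Ne.symm hm1]
  | case5 i hlt char hsep hval hy h4 hm1 hm2 =>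
    have hchar : char = l[i]'hlt := rfl
    have h1 : i + 1 < l.length := by omega
    have h2 : i + 2 < l.length := by omega
    push_neg at hm1
    rw [pvBLoop_eq, if_pos hlt, List.drop_eq_getElem_cons hlt, ← hchar, hy,
      List.drop_eq_getElem_cons h1, List.drop_eq_getElem_cons h2, hm1]
    simp [-List.getElem_cons_drop, pvFind, pvTokens, pvStartsWith, Ne.symm hm2]
  | case6 i hlt char hsep hval hy h4 hm1 hm2 hm3 =>
    have hchar : char = l[i]'hlt := rfl
    have h1 : i + 1 < l.length := by omega
    have h2 : i + 2 < l.length := by omega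
    have h3 : i + 3 < l.length := by omega
    push_neg at hm1 hm2
    rw [pvBLoop_eq, if_pos hlt, List.drop_eq_getElem_cons hlt, ← hchar, hy,
      List.drop_eq_getElem_cons h1, List.drop_eq_getElem_cons h2,
      List.drop_eq_getElem_cons h3, hm1, hm2]
    simp [-List.getElem_cons_drop, pvFind, pvTokens, pvStartsWith, Ne.symm hm3]
  | case7 i hlt char hsep hval hy h4 hm1 hm2 hm3 ih =>
    have hchar : char = l[i]'hlt := rfl
    have h1 : i + 1 < l.length := by omega
    have h2 : i + 2 < l.length := by omega
    have h3 : i + 3 < l.length := by omega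
    push_neg at hm1 hm2 hm3
    rw [pvBLoop_eq, if_pos hlt, List.drop_eq_getElem_cons hlt, ← hchar, hy,
      List.drop_eq_getElem_cons h1, List.drop_eq_getElem_cons h2,
      List.drop_eq_getElem_cons h3, hm1, hm2, hm3]
    simpa [-List.getElem_cons_drop, pvFind, pvTokens, pvStartsWith] using ih
  | case8 i hlt char hsep hval hy h2 =>
    have hchar : char = l[i]'hlt := rfl
    have hnil : l.drop (i+1) = [] := List.drop_eq_nil_of_le (by omega)
    rw [pvBLoop_eq, if_pos hlt, List.drop_eq_getElem_cons hlt, ← hchar, hnil]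
    rcases not_not.mp hval with hc | hc | hc | hc | hc | hc
    · exact absurd hc hy
    all_goals rw [hc]; simp [-List.getElem_cons_drop, pvFind, pvTokens, pvStartsWith]
  | case9 i hlt char hsep hval hy h2 hne =>
    have hchar : char = l[i]'hlt := rfl
    have h1 : i + 1 < l.length := by omega
    have hne' : char ≠ l[i+1]'h1 := by rw [hchar]; exact hne
    rw [pvBLoop_eq, if_pos hlt, List.drop_eq_getElem_cons hlt, ← hchar,
      List.drop_eq_getElem_cons h1]
    rcases not_not.mp hval with hc | hc | hc | hc | hc | hc
    · exact absurd hc hy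
    all_goals
      rw [hc] at hne' ⊢
      simp [-List.getElem_cons_drop, pvFind, pvTokens, pvStartsWith, hne']
  | case10 i hlt char hsep hval hy h2 heq ih =>
    have hchar : char = l[i]'hlt := rfl
    have h1 : i + 1 < l.length := by omega
    push_neg at heq
    rw [pvBLoop_eq, if_pos hlt, List.drop_eq_getElem_cons hlt, ← hchar,
      List.drop_eq_getElem_cons h1]
    rcases not_not.mp hval with hc | hc | hc | hc | hc | hc
    · exact absurd hc hy
    all_goals
      have hnext : l[i+1]'h1 = char := by rw [hchar]; exact heq.symm
      rw [hnext, hc]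
      simpa [-List.getElem_cons_drop, pvFind, pvTokens, pvStartsWith] using ih
  | case11 i hge =>
    rw [pvBLoop_eq, if_neg hge]

-- ===== VERDICT (by name: the statement is the Claim_ definition above) =====
theorem is_naming_valid_spec : Claim_equal_is_naming_valid := by
  intro s _
  unfold Spec_is_naming_valid is_naming_valid is_naming_valid_alt
  exact pv_main _ _
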